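-- pv_equiv track=rewrite | github.com/volamoks/assistant | pfm/asker.py | _build_buttons
-- ===== SOURCE A (Python) =====
-- CATEGORIES = [
--     ("🍔 Еда",       "FOOD"),
--     ("🚗 Транспорт", "TRANSPORT"),
--     ("🛍 Покупки",   "SHOPPING"),
--     ("💊 Здоровье",  "HEALTH"),
--     ("⚡ ЖКУ",       "UTILITIES"),
--     ("📱 Связь",     "TELECOM"),
--     ("🏧 ATM",       "ATM"),
--     ("💰 Доход",     "INCOME"),
--     ("↔️ Перевод",   "TRANSFER"),
--     ("❓ Другое",    "OTHER"),
-- ]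
--
-- def _build_buttons(tx_id: int) -> list[list[dict]]:
--     """Build 2-column inline keyboard for category selection."""
--     rows = []
--     row  = []
--     for label, key in CATEGORIES:
--         cb = f"pfm_cat:{tx_id}:{key}"
--         row.append({"text": label, "callback_data": cb[:64]})
--         if len(row) == 2:
--             rows.append(row)
--             row = []
--     if row:
--         rows.append(row)
--     rows.append([{"text": "⏩ Пропустить", "callback_data": f"pfm_cat:{tx_id}:SKIP"}])
--     return rows
-- ===== SOURCE B (Python) =====
-- CATEGORIES = [
--     ("🍔 Еда",       "FOOD"),
--     ("🚗 Транспорт", "TRANSPORT"),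
--     ("🛍 Покупки",   "SHOPPING"),
--     ("💊 Здоровье",  "HEALTH"),
--     ("⚡ ЖКУ",       "UTILITIES"),
--     ("📱 Связь",     "TELECOM"),
--     ("🏧 ATM",       "ATM"),
--     ("💰 Доход",     "INCOME"),
--     ("↔️ Перевод",   "TRANSFER"),
--     ("❓ Другое",    "OTHER"),
-- ]
--
-- def _build_buttons(tx_id: int) -> list[list[dict]]:
--     """Build 2-column inline keyboard for category selection (build-then-chunk)."""
--     buttons = [{"text": label, "callback_data": f"pfm_cat:{tx_id}:{key}"[:64]}
--                for label, key in CATEGORIES]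
--     rows = [buttons[i:i + 2] for i in range(0, len(buttons), 2)]
--     rows.append([{"text": "⏩ Пропустить", "callback_data": f"pfm_cat:{tx_id}:SKIP"}])
--     return rows
-- ===== Notes on version B (the rewrite author's own statement) =====
-- stated objective: simpler
-- what changed: Replaces the accumulate-and-flush loop (row buffer, length check, trailing flush) with build-then-chunk: one comprehension makes the flat button list, a slicing comprehension cuts it into two-wide rows, then the SKIP row is appended.
import Mathlib
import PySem

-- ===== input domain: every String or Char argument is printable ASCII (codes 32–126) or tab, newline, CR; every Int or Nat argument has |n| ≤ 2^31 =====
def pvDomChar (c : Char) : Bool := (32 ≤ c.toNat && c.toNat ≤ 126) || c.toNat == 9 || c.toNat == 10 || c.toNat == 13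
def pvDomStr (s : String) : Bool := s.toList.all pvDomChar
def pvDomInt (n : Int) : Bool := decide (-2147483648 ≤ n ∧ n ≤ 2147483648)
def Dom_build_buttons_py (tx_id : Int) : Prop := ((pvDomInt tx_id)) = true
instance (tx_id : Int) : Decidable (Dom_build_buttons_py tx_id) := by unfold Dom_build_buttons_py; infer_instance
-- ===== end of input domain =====

-- B builds the flat button list first and chunks it into two-wide rows by slicing (build-then-chunk),
-- instead of A's accumulate-and-flush row buffer; same output, simpler decomposition.


-- ===== PORT A =====
-- the module constant CATEGORIES
def pvCategories : List (String × String) :=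
  [("🍔 Еда", "FOOD"), ("🚗 Транспорт", "TRANSPORT"), ("🛍 Покупки", "SHOPPING"),
   ("💊 Здоровье", "HEALTH"), ("⚡ ЖКУ", "UTILITIES"), ("📱 Связь", "TELECOM"),
   ("🏧 ATM", "ATM"), ("💰 Доход", "INCOME"), ("↔️ Перевод", "TRANSFER"), ("❓ Другое", "OTHER")]

-- A: for-loop with (rows, row) accumulator, flush at length 2, trailing flush, then SKIP row
def build_buttons_py (tx_id : Int) : List (List (List (String × String))) :=
  let st := pvCategories.foldl (fun (st : List (List (List (String × String))) × List (List (String × String))) lk =>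
      let cb := "pfm_cat:" ++ PySem.Int.toStr tx_id ++ ":" ++ lk.2
      let row := st.2 ++ [[("text", lk.1), ("callback_data", PySem.Str.slice cb none (some 64))]]
      if row.length = 2 then (st.1 ++ [row], []) else (st.1, row)) ([], [])
  let rows := if st.2 ≠ [] then st.1 ++ [st.2] else st.1
  rows ++ [[[("text", "⏩ Пропустить"), ("callback_data", "pfm_cat:" ++ PySem.Int.toStr tx_id ++ ":SKIP")]]]

-- ===== PORT B =====
-- B: build the flat button list, chunk it by slicing with range(0, len, 2), append SKIP row
def build_buttons_py_alt (tx_id : Int) : List (List (List (String × String))) :=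
  let buttons := pvCategories.map (fun lk =>
      [("text", lk.1), ("callback_data", PySem.Str.slice ("pfm_cat:" ++ PySem.Int.toStr tx_id ++ ":" ++ lk.2) none (some 64))])
  let rows := (PySem.List.pyRange 0 (buttons.length : Int) 2).map (fun i =>
      PySem.List.slice buttons (some i) (some (i + 2)))
  rows ++ [[[("text", "⏩ Пропустить"), ("callback_data", "pfm_cat:" ++ PySem.Int.toStr tx_id ++ ":SKIP")]]]

-- ===== PRECONDITION & SPEC =====
def Spec_build_buttons_py (tx_id : Int) (out : List (List (List (String × String)))) : Prop := out = build_buttons_py_alt tx_id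
instance (tx_id : Int) (out : List (List (List (String × String)))) : Decidable (Spec_build_buttons_py tx_id out) := by unfold Spec_build_buttons_py; infer_instance

-- ===== CLAIM (what is proved, stated in full; the proofs are below) =====
def Claim_equal_build_buttons_py : Prop := ∀ (tx_id : Int), Dom_build_buttons_py tx_id → Spec_build_buttons_py tx_id (build_buttons_py tx_id)

-- ===== LEMMAS AND PROOFS =====

-- ===== VERDICT (by name: the statement is the Claim_ definition above) =====
theorem build_buttons_py_spec : Claim_equal_build_buttons_py := by
  intro tx_id _
  unfold Spec_build_buttons_py build_buttons_py build_buttons_py_alt pvCategories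
  simp [PySem.List.pyRange, PySem.List.slice, PySem.List.clampIdx]
  norm_num [List.range_succ]
  exact ⟨rfl, rfl, rfl, rfl, rfl⟩
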